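-- pv_equiv track=rewrite | github.com/Ajodo-Godson/automata_diags | automata/backend/drawings/automata_drawer.py | multi_alphabets_transition
-- ===== SOURCE A (Python) =====
-- from typing import Dict, Set
--
-- def multi_alphabets_transition(
--     transitions: Dict[str, Dict[str, str]]
-- ) -> Dict[str, Dict[str, str]]:
--     """
--     This handles cases when there are multiple alphabets from one states to another same direction.
--     Instead of drawing multiple edges, we draw a single edge with multiple labels.
--
--     Args:
--         transitions: The transition function of the DFA
--
--     Returns:
--         A modified transition function with combined labels for transitions to the same state
--     """
--     combined_transitions = {}
--
--     # For each source state
--     for from_state, trans in transitions.items():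
--         combined_transitions[from_state] = {}
--         target_states = {}
--
--         # Group transitions by target state
--         for symbol, to_state in trans.items():
--             if to_state not in target_states:
--                 target_states[to_state] = []
--             target_states[to_state].append(symbol)
--
--         # Combine symbols going to the same target state
--         for to_state, symbols in target_states.items():
--             label = ",".join(sorted(symbols))
--             combined_transitions[from_state][label] = to_state
--
--     return combined_transitions
-- ===== SOURCE B (Python) =====
-- def multi_alphabets_transition(transitions):
--     # Per source: distinct targets in first-appearance order, then one label per target
--     # gathered by a filter comprehension (no accumulator dict of lists).
--     return {
--         from_state: {
--             ",".join(sorted(sym for sym, tgt in trans.items() if tgt == target)): target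
--             for target in dict.fromkeys(trans.values())
--         }
--         for from_state, trans in transitions.items()
--     }
-- ===== Notes on version B (the rewrite author's own statement) =====
-- stated objective: simpler
-- what changed: Replaces A's per-source accumulator dict-of-lists grouping (build target->symbols lists, then join) by a single nested dict comprehension: ordered dedup of targets (dict.fromkeys) and, per target, a filter comprehension over the items gathering its symbols.
import Mathlib
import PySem

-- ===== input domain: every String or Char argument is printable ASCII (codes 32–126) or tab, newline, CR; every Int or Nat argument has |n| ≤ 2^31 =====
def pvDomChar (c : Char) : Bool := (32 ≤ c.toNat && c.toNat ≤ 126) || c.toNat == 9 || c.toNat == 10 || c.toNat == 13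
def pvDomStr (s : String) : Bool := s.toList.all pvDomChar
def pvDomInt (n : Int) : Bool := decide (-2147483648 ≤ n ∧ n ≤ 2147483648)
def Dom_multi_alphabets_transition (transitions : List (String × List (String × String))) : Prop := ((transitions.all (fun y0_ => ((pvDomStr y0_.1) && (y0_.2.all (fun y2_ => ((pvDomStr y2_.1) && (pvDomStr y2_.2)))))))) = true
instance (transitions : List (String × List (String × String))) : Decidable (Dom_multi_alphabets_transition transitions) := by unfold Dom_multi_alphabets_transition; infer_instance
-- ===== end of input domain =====

-- B replaces A's dict-of-lists grouping accumulator by, per source state, an ordered dedup of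
-- targets plus a per-target filter comprehension — simpler (a 3-line nested comprehension), same cost class.


-- ===== PORT A =====
-- 'if to_state not in target_states: …=[]' followed by '.append(symbol)' is Dict.modify (PySem's grouping idiom)
def multi_alphabets_transition (transitions : List (String × List (String × String))) : List (String × List (String × String)) :=
  (transitions.foldl (fun combined ft =>
    let target_states : PySem.Dict String (List String) :=
      ft.2.foldl (fun ts st => ts.modify st.2 [] (· ++ [st.1])) PySem.Dict.empty
    let inner : PySem.Dict String String :=
      target_states.items.foldl (fun d tsyms =>
        d.insert (PySem.Str.join "," (PySem.List.sorted tsyms.2 (fun s => s) false)) tsyms.1)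
        PySem.Dict.empty
    combined.insert ft.1 inner.items) (PySem.Dict.empty : PySem.Dict String (List (String × String)))).items

-- ===== PORT B =====
def multi_alphabets_transition_alt (transitions : List (String × List (String × String))) : List (String × List (String × String)) :=
  (transitions.foldl (fun acc ft =>
    acc.insert ft.1
      ((PySem.List.dedup (ft.2.map (·.2))).foldl (fun d target =>
        d.insert (PySem.Str.join ","
            (PySem.List.sorted ((ft.2.filter (fun st => st.2 == target)).map (·.1)) (fun s => s) false))
          target)
        (PySem.Dict.empty : PySem.Dict String String)).items)
    (PySem.Dict.empty : PySem.Dict String (List (String × String)))).items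

-- ===== PRECONDITION & SPEC =====
def Spec_multi_alphabets_transition (transitions : List (String × List (String × String))) (out : List (String × List (String × String))) : Prop := out = multi_alphabets_transition_alt transitions
instance (transitions : List (String × List (String × String))) (out : List (String × List (String × String))) : Decidable (Spec_multi_alphabets_transition transitions out) := by unfold Spec_multi_alphabets_transition; infer_instance

-- ===== CLAIM (what is proved, stated in full; the proofs are below) =====
def Claim_equal_multi_alphabets_transition : Prop := ∀ (transitions : List (String × List (String × String))), Dom_multi_alphabets_transition transitions → Spec_multi_alphabets_transition transitions (multi_alphabets_transition transitions)

-- ===== LEMMAS AND PROOFS =====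

-- A's grouping dict, as a list of items, is exactly B's dedup-of-targets with per-target filtered symbols.
theorem group_items_eq (trans : List (String × String)) :
    (trans.foldl (fun ts st => ts.modify st.2 [] (· ++ [st.1])) (PySem.Dict.empty : PySem.Dict String (List String))).items
      = (PySem.List.dedup (trans.map (·.2))).map
          (fun t => (t, (trans.filter (fun st => st.2 == t)).map (·.1))) := by
  have hfold : (trans.foldl (fun ts st => ts.modify st.2 [] (· ++ [st.1])) (PySem.Dict.empty : PySem.Dict String (List String)))
      = ((trans.map (fun st => (st.2, st.1))).foldl (fun ts p => ts.modify p.1 [] (· ++ [p.2])) PySem.Dict.empty) := by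
    rw [List.foldl_map]
  have hnd : (trans.foldl (fun ts st => ts.modify st.2 [] (· ++ [st.1])) (PySem.Dict.empty : PySem.Dict String (List String))).keys.Nodup := by
    exact PySem.Dict.nodup_keys_foldl_modify_key trans (fun st => st.2) [] (fun _ st => (· ++ [st.1])) _ (by simp)
  rw [PySem.Dict.items_eq_map_keys _ hnd []]
  have hkeys : (trans.foldl (fun ts st => ts.modify st.2 [] (· ++ [st.1])) (PySem.Dict.empty : PySem.Dict String (List String))).keys
      = PySem.List.dedup (trans.map (·.2)) := by
    rw [PySem.Dict.keys_foldl_modify_key]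
    simp [PySem.Dict.keys, PySem.Dict.empty, PySem.List.dedup_eq_ofList, PySem.Set.update]
    rfl
  rw [hkeys]
  apply List.map_congr_left
  intro t _
  congr 1
  rw [hfold, PySem.Dict.getD_foldl_modify_append]
  simp [List.filter_map, Function.comp_def]

-- inner fold of A over the grouped items equals B's fold over the deduped targets
theorem inner_eq (trans : List (String × String)) :
    ((trans.foldl (fun ts st => ts.modify st.2 [] (· ++ [st.1])) (PySem.Dict.empty : PySem.Dict String (List String))).items.foldl
        (fun d tsyms =>
          d.insert (PySem.Str.join "," (PySem.List.sorted tsyms.2 (fun s => s) false)) tsyms.1)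
        (PySem.Dict.empty : PySem.Dict String String))
      = ((PySem.List.dedup (trans.map (·.2))).foldl (fun d target =>
          d.insert (PySem.Str.join ","
              (PySem.List.sorted ((trans.filter (fun st => st.2 == target)).map (·.1)) (fun s => s) false))
            target)
          (PySem.Dict.empty : PySem.Dict String String)) := by
  rw [group_items_eq, List.foldl_map]

-- ===== VERDICT (by name: the statement is the Claim_ definition above) =====
theorem multi_alphabets_transition_spec : Claim_equal_multi_alphabets_transition := by
  intro transitions _
  unfold Spec_multi_alphabets_transition multi_alphabets_transition multi_alphabets_transition_alt
  congr 1
  apply PySem.List.foldl_congr_mem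
  intro acc ft _
  simp only [inner_eq]
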